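-- pv_equiv track=rewrite | github.com/kKzksw/E-commerce-Product-RAG-Recommendation-System | src/retriever/review_insights.py | _sample_reviews
-- ===== SOURCE A (Python) =====
-- from typing import Dict, List, Optional
--
-- def _sample_reviews(reviews: List[str], max_chars: int = 3000) -> str:
--     """Pick a spread of reviews up to max_chars to stay within LLM context."""
--     if not reviews:
--         return ""
--     step = max(1, len(reviews) // 20)
--     sampled = []
--     total = 0
--     for i in range(0, len(reviews), step):
--         r = str(reviews[i]).strip()
--         if not r:
--             continue
--         if total + len(r) > max_chars:
--             break
--         sampled.append(r)
--         total += len(r)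
--     return "\n---\n".join(sampled)
-- ===== SOURCE B (Python) =====
-- def _sample_reviews(reviews, max_chars=3000):
--     """Pick a spread of reviews up to max_chars to stay within LLM context."""
--     if not reviews:
--         return ""
--     step = max(1, len(reviews) // 20)
--     sampled = [r for r in (str(reviews[i]).strip() for i in range(0, len(reviews), step)) if r]
--     totals = []
--     t = 0
--     for s in sampled:
--         t += len(s)
--         totals.append(t)
--     cut = len(sampled)
--     for k, t in enumerate(totals):
--         if t > max_chars:
--             cut = k
--             break
--     return "\n---\n".join(sampled[:cut])
-- ===== Notes on version B (the rewrite author's own statement) =====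
-- stated objective: alternative
-- what changed: A's single accumulate-and-break loop is replaced by a filtering comprehension that builds the sampled list, an explicit prefix-sum table of lengths, and a first-exceed cutoff index whose prefix is joined.
import Mathlib
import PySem

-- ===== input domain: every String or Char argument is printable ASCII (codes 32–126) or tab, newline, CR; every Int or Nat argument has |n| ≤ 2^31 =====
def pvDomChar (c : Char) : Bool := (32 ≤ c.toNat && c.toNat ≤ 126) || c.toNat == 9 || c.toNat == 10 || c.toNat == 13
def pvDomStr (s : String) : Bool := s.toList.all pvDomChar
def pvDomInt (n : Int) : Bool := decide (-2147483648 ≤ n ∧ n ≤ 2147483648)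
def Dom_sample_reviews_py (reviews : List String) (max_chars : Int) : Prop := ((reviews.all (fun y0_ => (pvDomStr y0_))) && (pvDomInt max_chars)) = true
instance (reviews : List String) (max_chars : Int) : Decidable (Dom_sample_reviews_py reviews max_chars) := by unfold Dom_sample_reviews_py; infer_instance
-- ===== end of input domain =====

-- B replaces A's single accumulate-and-break loop by a filtering comprehension, an explicit
-- prefix-sum table, and a first-exceed cutoff index (objective: alternative decomposition).

-- ===== PORT A =====
-- the for-loop with break/continue, carrying the running total
def sampleA_go (reviews : List String) (max_chars : Int) : List Int → Int → List String
  | [], _ => []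
  | i :: rest, total =>
    let r := PySem.Str.strip ((PySem.List.pyGet? reviews i).getD "")
    if r = "" then sampleA_go reviews max_chars rest total
    else if total + PySem.Str.len r > max_chars then []
    else r :: sampleA_go reviews max_chars rest (total + PySem.Str.len r)

def sample_reviews_py (reviews : List String) (max_chars : Int) : String :=
  if reviews = [] then ""
  else
    let step := max 1 (PySem.Int.floordiv (reviews.length : Int) 20)
    PySem.Str.join "\n---\n" (sampleA_go reviews max_chars (PySem.List.pyRange 0 (reviews.length : Int) step) 0)

-- ===== PORT B =====
-- prefix-sum table of the lengths (Python: the totals loop)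
def prefixTotals : List String → Int → List Int
  | [], _ => []
  | s :: rest, t => (t + PySem.Str.len s) :: prefixTotals rest (t + PySem.Str.len s)

-- index of the first total exceeding max_chars, else the length (Python: the cut loop)
def cutIdx (max_chars : Int) : List Int → Nat
  | [] => 0
  | t :: rest => if t > max_chars then 0 else cutIdx max_chars rest + 1

def sample_reviews_py_alt (reviews : List String) (max_chars : Int) : String :=
  if reviews = [] then ""
  else
    let step := max 1 (PySem.Int.floordiv (reviews.length : Int) 20)
    let sampled := (PySem.List.pyRange 0 (reviews.length : Int) step).filterMap
      (fun i => let r := PySem.Str.strip ((PySem.List.pyGet? reviews i).getD "");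
                if r = "" then none else some r)
    let totals := prefixTotals sampled 0
    PySem.Str.join "\n---\n" (sampled.take (cutIdx max_chars totals))

-- ===== PRECONDITION & SPEC =====
def Spec_sample_reviews_py (reviews : List String) (max_chars : Int) (out : String) : Prop := out = sample_reviews_py_alt reviews max_chars
instance (reviews : List String) (max_chars : Int) (out : String) : Decidable (Spec_sample_reviews_py reviews max_chars out) := by unfold Spec_sample_reviews_py; infer_instance

-- ===== CLAIM (what is proved, stated in full; the proofs are below) =====
def Claim_equal_sample_reviews_py : Prop := ∀ (reviews : List String) (max_chars : Int), Dom_sample_reviews_py reviews max_chars → Spec_sample_reviews_py reviews max_chars (sample_reviews_py reviews max_chars)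

-- ===== LEMMAS AND PROOFS =====
-- A's break loop equals take-to-first-exceed over the filtered list, for any index list and running total
theorem sampleA_go_eq (reviews : List String) (max_chars : Int) :
    ∀ (idxs : List Int) (total : Int),
      sampleA_go reviews max_chars idxs total =
        (idxs.filterMap (fun i =>
            let r := PySem.Str.strip ((PySem.List.pyGet? reviews i).getD "");
            if r = "" then none else some r)).take
          (cutIdx max_chars
            (prefixTotals (idxs.filterMap (fun i =>
              let r := PySem.Str.strip ((PySem.List.pyGet? reviews i).getD "");
              if r = "" then none else some r)) total)) := by
  intro idxs
  induction idxs with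
  | nil => intro total; simp [sampleA_go, prefixTotals, cutIdx]
  | cons i rest ih =>
    intro total
    by_cases hr : PySem.Str.strip ((PySem.List.pyGet? reviews i).getD "") = ""
    · simp [sampleA_go, hr, ih]
    · by_cases hb : total + PySem.Str.len (PySem.Str.strip ((PySem.List.pyGet? reviews i).getD "")) > max_chars
      · have hb' := hb; simp at hb'
        simp [sampleA_go, hr, hb', prefixTotals, cutIdx]
      · simp only [sampleA_go, hr, if_false, List.filterMap_cons, prefixTotals, cutIdx]
        rw [if_neg hb, if_neg hb, List.take_succ_cons, ih]

-- ===== VERDICT (by name: the statement is the Claim_ definition above) =====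
theorem sample_reviews_py_spec : Claim_equal_sample_reviews_py := by
  intro reviews max_chars _
  unfold Spec_sample_reviews_py sample_reviews_py sample_reviews_py_alt
  by_cases h : reviews = []
  · simp [h]
  · simp only [h, if_false]
    rw [sampleA_go_eq]
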